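-- pv_equiv track=rewrite | github.com/Phosphorescentt/SimpleTournamentFormats | DataProcessing.py | aggregate_wins
-- ===== SOURCE A (Python) =====
-- def aggregate_wins(teams, results):
--     aggregate_results = [0] * len(teams)
--
--     for result in results:
--         if result[0] == teams[0]:
--             aggregate_results[0] += 1
--         if result[0] == teams[1]:
--             aggregate_results[1] += 1
--
--     return aggregate_results
-- ===== SOURCE B (Python) =====
-- def _bisect_left(a, x):
--     lo, hi = 0, len(a)
--     while lo < hi:
--         mid = (lo + hi) // 2
--         if a[mid] < x:
--             lo = mid + 1
--         else:
--             hi = mid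
--     return lo
--
--
-- def _bisect_right(a, x):
--     lo, hi = 0, len(a)
--     while lo < hi:
--         mid = (lo + hi) // 2
--         if x < a[mid]:
--             hi = mid
--         else:
--             lo = mid + 1
--     return lo
--
--
-- def aggregate_wins(teams, results):
--     out = [0] * len(teams)
--     if results:
--         winners = sorted(r[0] for r in results)
--         out[0] = _bisect_right(winners, teams[0]) - _bisect_left(winners, teams[0])
--         out[1] = _bisect_right(winners, teams[1]) - _bisect_left(winners, teams[1])
--     return out
-- ===== Notes on version B (the rewrite author's own statement) =====
-- stated objective: alternative
-- what changed: B sorts the winner column once and computes each of the two tracked teams' win counts by binary search (bisect_right - bisect_left on the sorted winners), replacing A's single linear pass of per-result equality tests and increments.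
import Mathlib
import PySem

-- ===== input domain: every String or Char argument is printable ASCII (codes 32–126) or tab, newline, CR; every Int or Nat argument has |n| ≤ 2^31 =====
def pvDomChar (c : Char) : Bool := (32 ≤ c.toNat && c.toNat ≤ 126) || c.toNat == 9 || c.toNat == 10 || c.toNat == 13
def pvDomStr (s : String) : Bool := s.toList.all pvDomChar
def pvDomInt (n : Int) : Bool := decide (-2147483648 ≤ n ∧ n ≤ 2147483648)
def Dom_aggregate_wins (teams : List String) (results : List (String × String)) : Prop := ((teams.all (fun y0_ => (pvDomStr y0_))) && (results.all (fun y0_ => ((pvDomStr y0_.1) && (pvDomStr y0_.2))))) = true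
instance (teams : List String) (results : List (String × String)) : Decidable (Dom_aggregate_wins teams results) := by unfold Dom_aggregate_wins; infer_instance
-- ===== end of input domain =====

-- B sorts the winner column once and counts each of the two tracked teams' wins by binary
-- search (bisect_right - bisect_left), instead of A's linear pass of per-result equality
-- tests; equivalence proved on Pre_ (A raises IndexError outside it).


-- ===== PORT A =====
-- one iteration of A's for-loop: the two independent 'if result[0] == teams[k]' updates, in order
def aggStepA (teams : List String) (acc : List Int) (result : String × String) : List Int :=
  let acc := if PySem.List.pyGet? teams 0 = some result.1
             then PySem.List.pySetD acc 0 (PySem.List.pyGetD acc 0 0 + 1) else acc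
  if PySem.List.pyGet? teams 1 = some result.1
  then PySem.List.pySetD acc 1 (PySem.List.pyGetD acc 1 0 + 1) else acc

def aggregate_wins (teams : List String) (results : List (String × String)) : List Int :=
  results.foldl (aggStepA teams) (List.replicate teams.length (0 : Int))

-- ===== PORT B =====
-- Source B's hand-written _bisect_left/_bisect_right are exactly the lo/hi binary-search loop of
-- PySem.List.bisectLeft/bisectRight (same midpoint (lo+hi)//2, same branches), cited here.
def aggregate_wins_alt (teams : List String) (results : List (String × String)) : List Int :=
  let out := List.replicate teams.length (0 : Int)
  if results = [] then out
  else
    let winners := PySem.List.sorted (results.map Prod.fst) (fun w => w) false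
    let t0 := PySem.List.pyGetD teams 0 ""
    let t1 := PySem.List.pyGetD teams 1 ""
    let out := PySem.List.pySetD out 0
      ((PySem.List.bisectRight winners t0 : Int) - (PySem.List.bisectLeft winners t0 : Int))
    PySem.List.pySetD out 1
      ((PySem.List.bisectRight winners t1 : Int) - (PySem.List.bisectLeft winners t1 : Int))

-- ===== PRECONDITION & SPEC =====
-- A raises IndexError on teams[0]/teams[1] whenever results is non-empty and teams has fewer
-- than two entries; exactly those inputs are excluded (B raises there too).
def Pre_aggregate_wins (teams : List String) (results : List (String × String)) : Prop :=
  results = [] ∨ 2 ≤ teams.length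
instance (teams : List String) (results : List (String × String)) : Decidable (Pre_aggregate_wins teams results) := by unfold Pre_aggregate_wins; infer_instance

def pvWitness_aggregate_wins : List String × (List (String × String)) :=
  (["a", "b", "c"], [("a", "b"), ("b", "a"), ("a", "c")])

def Spec_aggregate_wins (teams : List String) (results : List (String × String)) (out : List Int) : Prop := out = aggregate_wins_alt teams results
instance (teams : List String) (results : List (String × String)) (out : List Int) : Decidable (Spec_aggregate_wins teams results out) := by unfold Spec_aggregate_wins; infer_instance

-- ===== CLAIM (what is proved, stated in full; the proofs are below) =====
def Claim_equal_aggregate_wins : Prop := ∀ (teams : List String) (results : List (String × String)), Dom_aggregate_wins teams results → Pre_aggregate_wins teams results → Spec_aggregate_wins teams results (aggregate_wins teams results)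

-- ===== LEMMAS AND PROOFS =====

-- one step of A's loop on an (a :: b :: zs) accumulator, in closed form
theorem aggStepA_cons (t0 t1 : String) (rest : List String) (r : String × String)
    (a b : Int) (zs : List Int) :
    aggStepA (t0 :: t1 :: rest) (a :: b :: zs) r
    = (if t0 = r.1 then a + 1 else a) :: (if t1 = r.1 then b + 1 else b) :: zs := by
  have h0 : PySem.List.pyGet? (t0 :: t1 :: rest) 0 = some t0 :=
    PySem.List.pyGet?_zero_cons _ _
  have h1 : PySem.List.pyGet? (t0 :: t1 :: rest) 1 = some t1 := by
    rw [PySem.List.pyGet?_of_nonneg _ (by norm_num)]; rfl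
  have s0 : ∀ (x y v : Int), PySem.List.pySetD (x :: y :: zs) 0 v = v :: y :: zs := by
    intro x y v; rw [PySem.List.pySetD_of_nonneg (h := by norm_num)]; rfl
  have s1 : ∀ (x y v : Int), PySem.List.pySetD (x :: y :: zs) 1 v = x :: v :: zs := by
    intro x y v; rw [PySem.List.pySetD_of_nonneg (h := by norm_num)]; rfl
  have g0 : ∀ (x y : Int), PySem.List.pyGetD (x :: y :: zs) 0 0 = x := by
    intro x y; rw [PySem.List.pyGetD_of_nonneg _ _ (by norm_num)]; rfl
  have g1 : ∀ (x y : Int), PySem.List.pyGetD (x :: y :: zs) 1 0 = y := by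
    intro x y; rw [PySem.List.pyGetD_of_nonneg _ _ (by norm_num)]; rfl
  simp only [aggStepA, h0, h1, Option.some_inj]
  by_cases e0 : t0 = r.1 <;> by_cases e1 : t1 = r.1 <;>
    simp [e0, e1, s0, s1, g0, g1]

-- A's loop over an (a :: b :: zs) accumulator adds the winner-counts of teams[0]/teams[1].
theorem aggA_loop (t0 t1 : String) (rest : List String) (rs : List (String × String))
    (a b : Int) (zs : List Int) :
    rs.foldl (aggStepA (t0 :: t1 :: rest)) (a :: b :: zs)
    = (a + ((rs.map Prod.fst).count t0 : Int)) :: (b + ((rs.map Prod.fst).count t1 : Int)) :: zs := by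
  induction rs generalizing a b with
  | nil => simp
  | cons r rs ih =>
    simp only [List.foldl_cons, aggStepA_cons, List.map_cons, List.count_cons]
    rw [ih]
    by_cases e0 : t0 = r.1 <;> by_cases e1 : t1 = r.1
    · simp [e0, e1]; constructor <;> omega
    · simp [e0, e1]; exact ⟨by omega, fun h => e1 h.symm⟩
    · simp [e0, e1]; exact ⟨fun h => e0 h.symm, by omega⟩
    · simp [e0, e1]; exact ⟨fun h => e0 h.symm, fun h => e1 h.symm⟩

-- a list whose first r positions satisfy p and whose remaining positions do not has countP p = r
theorem countP_boundary (p : String → Bool) (xs : List String) (r : Nat) (hr : r ≤ xs.length)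
    (h1 : ∀ j (hj : j < xs.length), j < r → p xs[j])
    (h2 : ∀ j (hj : j < xs.length), r ≤ j → ¬ p xs[j]) :
    xs.countP p = r := by
  induction xs generalizing r with
  | nil => simp only [List.countP_nil]; simp only [List.length_nil] at hr; omega
  | cons a t ih =>
    cases r with
    | zero =>
      rw [List.countP_eq_length_filter, List.length_eq_zero_iff, List.filter_eq_nil_iff]
      intro x hx
      obtain ⟨j, hj, hje⟩ := List.mem_iff_getElem.mp hx
      subst hje; exact h2 j hj (Nat.zero_le j)
    | succ r' =>
      have ha : p a := h1 0 (by simp) (Nat.succ_pos r')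
      rw [List.countP_cons, if_pos ha]
      have : t.countP p = r' := by
        apply ih r' (by simpa using hr)
        · intro j hj hjr
          have := h1 (j + 1) (by simpa using Nat.succ_lt_succ hj) (Nat.succ_lt_succ hjr)
          simpa using this
        · intro j hj hjr
          have := h2 (j + 1) (by simpa using Nat.succ_lt_succ hj) (Nat.succ_le_succ hjr)
          simpa using this
      omega

-- the bisect_left loop on a sorted list computes the number of elements < x
theorem blLoop_eq (xs : List String) (x : String) (hs : List.Pairwise (· ≤ ·) xs) :
    ∀ (fuel lo hi : Nat), lo ≤ hi → hi ≤ xs.length → hi - lo ≤ fuel →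
    (∀ j (hj : j < xs.length), j < lo → xs[j] < x) →
    (∀ j (hj : j < xs.length), hi ≤ j → x ≤ xs[j]) →
    PySem.List.bisectLeftLoop xs x fuel lo hi = xs.countP (fun w => decide (w < x)) := by
  have mono := List.pairwise_iff_getElem.mp hs
  intro fuel
  induction fuel with
  | zero =>
    intro lo hi hlh hhl hf hL hR
    have : lo = hi := by omega
    subst this
    rw [PySem.List.bisectLeftLoop.eq_def]
    exact (countP_boundary _ xs lo hhl (fun j hj hjr => by simpa using hL j hj hjr)
      (fun j hj hjr => by simpa using not_lt.mpr (hR j hj hjr))).symm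
  | succ fuel ih =>
    intro lo hi hlh hhl hf hL hR
    rw [PySem.List.bisectLeftLoop.eq_def]
    by_cases hlt : lo < hi
    · have hmid : (lo + hi) / 2 < xs.length := by omega
      simp only [if_pos hlt, List.getElem?_eq_getElem hmid]
      by_cases hy : xs[(lo + hi) / 2] < x
      · simp only [if_pos hy]
        apply ih ((lo + hi) / 2 + 1) hi (by omega) hhl (by omega) _ hR
        intro j hj hjr
        rcases Nat.lt_succ_iff_lt_or_eq.mp hjr with h | h
        · exact lt_of_le_of_lt (mono j _ hj hmid h) hy
        · subst h; exact hy
      · simp only [if_neg hy]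
        apply ih lo ((lo + hi) / 2) (by omega) (by omega) (by omega) hL
        intro j hj hjr
        have hx : x ≤ xs[(lo + hi) / 2] := not_lt.mp hy
        rcases Nat.lt_or_ge ((lo + hi) / 2) j with h | h
        · exact le_trans hx (mono _ j hmid hj h)
        · have : j = (lo + hi) / 2 := by omega
          subst this; exact hx
    · simp only [if_neg hlt]
      have : lo = hi := by omega
      subst this
      exact (countP_boundary _ xs lo hhl (fun j hj hjr => by simpa using hL j hj hjr)
        (fun j hj hjr => by simpa using not_lt.mpr (hR j hj hjr))).symm

-- the bisect_right loop on a sorted list computes the number of elements ≤ x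
theorem brLoop_eq (xs : List String) (x : String) (hs : List.Pairwise (· ≤ ·) xs) :
    ∀ (fuel lo hi : Nat), lo ≤ hi → hi ≤ xs.length → hi - lo ≤ fuel →
    (∀ j (hj : j < xs.length), j < lo → xs[j] ≤ x) →
    (∀ j (hj : j < xs.length), hi ≤ j → x < xs[j]) →
    PySem.List.bisectRightLoop xs x fuel lo hi = xs.countP (fun w => decide (w ≤ x)) := by
  have mono := List.pairwise_iff_getElem.mp hs
  intro fuel
  induction fuel with
  | zero =>
    intro lo hi hlh hhl hf hL hR
    have : lo = hi := by omega
    subst this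
    rw [PySem.List.bisectRightLoop.eq_def]
    exact (countP_boundary _ xs lo hhl (fun j hj hjr => by simpa using hL j hj hjr)
      (fun j hj hjr => by simpa using not_le.mpr (hR j hj hjr))).symm
  | succ fuel ih =>
    intro lo hi hlh hhl hf hL hR
    rw [PySem.List.bisectRightLoop.eq_def]
    by_cases hlt : lo < hi
    · have hmid : (lo + hi) / 2 < xs.length := by omega
      simp only [if_pos hlt, List.getElem?_eq_getElem hmid]
      by_cases hy : x < xs[(lo + hi) / 2]
      · simp only [if_pos hy]
        apply ih lo ((lo + hi) / 2) (by omega) (by omega) (by omega) hL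
        intro j hj hjr
        rcases Nat.lt_or_ge ((lo + hi) / 2) j with h | h
        · exact lt_of_lt_of_le hy (mono _ j hmid hj h)
        · have : j = (lo + hi) / 2 := by omega
          subst this; exact hy
      · simp only [if_neg hy]
        apply ih ((lo + hi) / 2 + 1) hi (by omega) hhl (by omega) _ hR
        intro j hj hjr
        have hx : xs[(lo + hi) / 2] ≤ x := not_lt.mp hy
        rcases Nat.lt_succ_iff_lt_or_eq.mp hjr with h | h
        · exact le_trans (mono j _ hj hmid h) hx
        · subst h; exact hx
    · simp only [if_neg hlt]
      have : lo = hi := by omega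
      subst this
      exact (countP_boundary _ xs lo hhl (fun j hj hjr => by simpa using hL j hj hjr)
        (fun j hj hjr => by simpa using not_le.mpr (hR j hj hjr))).symm

-- splitting '≤ x' into '< x' and '= x'
theorem countP_le_split (xs : List String) (x : String) :
    xs.countP (fun w => decide (w ≤ x)) = xs.countP (fun w => decide (w < x)) + xs.count x := by
  induction xs with
  | nil => rfl
  | cons a t ih =>
    rw [List.countP_cons, List.countP_cons, List.count_cons, ih]
    by_cases h : a = x
    · subst h
      rw [decide_eq_true (le_refl a), decide_eq_false (lt_irrefl a), beq_self_eq_true]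
      simp only [if_true, Bool.false_eq_true, if_false]
      omega
    · rw [decide_eq_decide.mpr ⟨fun hle => lt_of_le_of_ne hle h, le_of_lt⟩,
        beq_eq_false_iff_ne.mpr h]
      simp only [Bool.false_eq_true, if_false]
      omega

-- on a sorted copy of ws, bisect_right - bisect_left is the count of x in ws (as an Int)
theorem bisect_diff_eq_count (ws : List (String × String)) (x : String) :
    (PySem.List.bisectRight (PySem.List.sorted (ws.map Prod.fst) (fun w => w) false) x : Int)
      - (PySem.List.bisectLeft (PySem.List.sorted (ws.map Prod.fst) (fun w => w) false) x : Int)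
    = ((ws.map Prod.fst).count x : Int) := by
  set s := PySem.List.sorted (ws.map Prod.fst) (fun w => w) false with hsdef
  have hpw : List.Pairwise (· ≤ ·) s := PySem.List.sorted_pairwise (ws.map Prod.fst) (fun w => w)
  have hbl : PySem.List.bisectLeft s x = s.countP (fun w => decide (w < x)) :=
    blLoop_eq s x hpw s.length 0 s.length (Nat.zero_le _) le_rfl (by omega)
      (fun j hj hjr => by omega) (fun j hj hjr => by omega)
  have hbr : PySem.List.bisectRight s x = s.countP (fun w => decide (w ≤ x)) :=
    brLoop_eq s x hpw s.length 0 s.length (Nat.zero_le _) le_rfl (by omega)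
      (fun j hj hjr => by omega) (fun j hj hjr => by omega)
  have hcount : s.count x = (ws.map Prod.fst).count x :=
    (PySem.List.sorted_perm (ws.map Prod.fst) (fun w => w) false).count_eq x
  rw [hbl, hbr, countP_le_split, ← hcount]
  push_cast
  ring

-- ===== VERDICT (by name: the statement is the Claim_ definition above) =====
theorem aggregate_wins_spec : Claim_equal_aggregate_wins := by
  intro teams results _hd hpre
  unfold Spec_aggregate_wins aggregate_wins aggregate_wins_alt
  by_cases hres : results = []
  · simp [hres]
  · rcases hpre with hpre | hpre
    · exact absurd hpre hres
    · match teams, hpre with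
      | t0 :: t1 :: rest, _ =>
        simp only [if_neg hres, List.length_cons, List.replicate_succ]
        rw [aggA_loop]
        have g0 : PySem.List.pyGetD (t0 :: t1 :: rest) 0 "" = t0 := by
          rw [PySem.List.pyGetD_of_nonneg _ _ (by norm_num)]; rfl
        have g1 : PySem.List.pyGetD (t0 :: t1 :: rest) 1 "" = t1 := by
          rw [PySem.List.pyGetD_of_nonneg _ _ (by norm_num)]; rfl
        rw [g0, g1, bisect_diff_eq_count, bisect_diff_eq_count]
        rw [PySem.List.pySetD_of_nonneg (h := by norm_num),
          PySem.List.pySetD_of_nonneg (h := by norm_num)]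
        simp [List.set]
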